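-- pv_equiv track=rewrite | github.com/who96/DAOKit | src/reliability/handoff/package.py | _classify_step_lifecycle
-- ===== SOURCE A (Python) =====
-- from typing import Any, Callable, Mapping, Sequence
--
-- def _classify_step_lifecycle(value: Any) -> str:
--     if not isinstance(value, str):
--         return "pending"
--     normalized = value.strip().lower()
--     if not normalized:
--         return "pending"
--
--     accepted_markers = ("accepted", "done", "completed", "passed", "verified")
--     if normalized in accepted_markers:
--         return "accepted"
--     if any(normalized.startswith(f"{marker}_") for marker in accepted_markers):
--         return "accepted"
--     if any(normalized.startswith(f"{marker}-") for marker in accepted_markers):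
--         return "accepted"
--
--     if "failed" in normalized or normalized in {"error", "blocked"}:
--         return "failed"
--     return "pending"
-- ===== SOURCE B (Python) =====
-- _ACCEPTED = {"accepted", "done", "completed", "passed", "verified"}
--
--
-- def _classify_step_lifecycle(value):
--     if not isinstance(value, str):
--         return "pending"
--     normalized = value.strip().lower()
--     if not normalized:
--         return "pending"
--
--     # one scan for the first separator (underscore or hyphen), then one set lookup
--     i = 0
--     while i < len(normalized) and normalized[i] != '_' and normalized[i] != '-':
--         i += 1
--     if normalized[:i] in _ACCEPTED:
--         return "accepted"
--
--     if "failed" in normalized or normalized in {"error", "blocked"}: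
--         return "failed"
--     return "pending"
-- ===== Notes on version B (the rewrite author's own statement) =====
-- stated objective: simpler
-- what changed: The accepted branch's three marker scans (exact membership plus two startswith sweeps over formatted marker+separator strings) are replaced by one scan for the first underscore/hyphen separator followed by a single set lookup of the extracted leading token.
import Mathlib
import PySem

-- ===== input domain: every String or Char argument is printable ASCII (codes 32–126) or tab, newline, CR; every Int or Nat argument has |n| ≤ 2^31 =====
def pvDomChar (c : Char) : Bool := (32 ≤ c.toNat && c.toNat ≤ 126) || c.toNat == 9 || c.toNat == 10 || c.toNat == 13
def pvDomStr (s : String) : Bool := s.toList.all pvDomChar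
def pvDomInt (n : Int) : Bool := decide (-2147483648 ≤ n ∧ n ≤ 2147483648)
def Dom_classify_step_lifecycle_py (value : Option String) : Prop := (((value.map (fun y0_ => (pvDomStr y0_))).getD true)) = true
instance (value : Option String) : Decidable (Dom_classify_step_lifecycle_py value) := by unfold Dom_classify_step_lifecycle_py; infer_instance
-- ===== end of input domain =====

-- B replaces A's three marker scans (exact membership + two startswith sweeps) by one
-- scan for the first underscore/hyphen separator and a single set lookup of the leading token (simpler).

def pvMarkers : List String := ["accepted", "done", "completed", "passed", "verified"]

-- ===== PORT A =====
def classify_step_lifecycle_py (value : Option String) : String :=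
  match value with
  | none => "pending"                                   -- not isinstance(value, str)
  | some v =>
    let normalized := PySem.Str.lower (PySem.Str.strip v)
    if normalized = "" then "pending"
    else if pvMarkers.contains normalized then "accepted"
    else if pvMarkers.any (fun marker => PySem.Str.startswith normalized (marker ++ "_")) then "accepted"
    else if pvMarkers.any (fun marker => PySem.Str.startswith normalized (marker ++ "-")) then "accepted"
    else if PySem.Str.isIn "failed" normalized || normalized = "error" || normalized = "blocked" then "failed"
    else "pending"

-- ===== PORT B =====
-- the while loop of Source B: take characters until the first underscore or hyphen
def pvLeadToken : List Char → List Char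
  | [] => []
  | c :: cs => if c = '_' ∨ c = '-' then [] else c :: pvLeadToken cs

def classify_step_lifecycle_py_alt (value : Option String) : String :=
  match value with
  | none => "pending"
  | some v =>
    let normalized := PySem.Str.lower (PySem.Str.strip v)
    if normalized = "" then "pending"
    else if PySem.Set.contains (PySem.Set.ofList pvMarkers) (String.ofList (pvLeadToken normalized.toList)) then "accepted"
    else if PySem.Str.isIn "failed" normalized || normalized = "error" || normalized = "blocked" then "failed"
    else "pending"

-- ===== PRECONDITION & SPEC =====
def Spec_classify_step_lifecycle_py (value : Option String) (out : String) : Prop := out = classify_step_lifecycle_py_alt value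
instance (value : Option String) (out : String) : Decidable (Spec_classify_step_lifecycle_py value out) := by unfold Spec_classify_step_lifecycle_py; infer_instance

-- ===== CLAIM (what is proved, stated in full; the proofs are below) =====
def Claim_equal_classify_step_lifecycle_py : Prop := ∀ (value : Option String), Dom_classify_step_lifecycle_py value → Spec_classify_step_lifecycle_py value (classify_step_lifecycle_py value)

-- ===== LEMMAS AND PROOFS =====

def pvNoSep (m : List Char) : Prop := ∀ c ∈ m, ¬(c = '_' ∨ c = '-')

theorem pvLeadToken_self (m : List Char) (hm : pvNoSep m) : pvLeadToken m = m := by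
  induction m with
  | nil => rfl
  | cons c cs ih =>
    have hc := hm c (by simp)
    simp [pvLeadToken, hc, ih (fun d hd => hm d (by simp [hd]))]

theorem pvLeadToken_append (m : List Char) (s : Char) (rest : List Char)
    (hm : pvNoSep m) (hs : s = '_' ∨ s = '-') : pvLeadToken (m ++ s :: rest) = m := by
  induction m with
  | nil => simp [pvLeadToken, hs]
  | cons c cs ih =>
    have hc := hm c (by simp)
    simp [pvLeadToken, hc, ih (fun d hd => hm d (by simp [hd]))]

theorem pvLeadToken_inv (l m : List Char) (h : pvLeadToken l = m) :
    l = m ∨ (m ++ ['_']) <+: l ∨ (m ++ ['-']) <+: l := by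
  induction l generalizing m with
  | nil => left; simpa [pvLeadToken] using h.symm
  | cons c cs ih =>
    by_cases hc : c = '_' ∨ c = '-'
    · have hm : m = [] := by simpa [pvLeadToken, hc] using h.symm
      subst hm
      rcases hc with rfl | rfl
      · right; left; exact ⟨cs, rfl⟩
      · right; right; exact ⟨cs, rfl⟩
    · simp only [pvLeadToken, if_neg hc] at h
      cases m with
      | nil => exact absurd h (by simp)
      | cons d m' =>
        injection h with h1 h2
        subst h1
        rcases ih m' h2 with rfl | ⟨t, ht⟩ | ⟨t, ht⟩
        · left; rfl
        · right; left; exact ⟨t, by simp [← ht]⟩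
        · right; right; exact ⟨t, by simp [← ht]⟩

theorem pvLeadToken_iff (l m : List Char) (hm : pvNoSep m) :
    pvLeadToken l = m ↔ (l = m ∨ (m ++ ['_']) <+: l ∨ (m ++ ['-']) <+: l) := by
  constructor
  · exact pvLeadToken_inv l m
  · rintro (rfl | ⟨t, ht⟩ | ⟨t, ht⟩)
    · exact pvLeadToken_self _ hm
    · rw [← ht, List.append_assoc]; exact pvLeadToken_append m _ t hm (Or.inl rfl)
    · rw [← ht, List.append_assoc]; exact pvLeadToken_append m _ t hm (Or.inr rfl)

theorem pvNoSep_markers (m : String) (hmem : m ∈ pvMarkers) : pvNoSep m.toList := by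
  fin_cases hmem <;>
    (intro c hc
     simp only [show "accepted".toList = ['a','c','c','e','p','t','e','d'] from rfl,
       show "done".toList = ['d','o','n','e'] from rfl,
       show "completed".toList = ['c','o','m','p','l','e','t','e','d'] from rfl,
       show "passed".toList = ['p','a','s','s','e','d'] from rfl,
       show "verified".toList = ['v','e','r','i','f','i','e','d'] from rfl] at hc
     fin_cases hc <;> simp)

-- the accepted conditions of the two ports coincide
theorem pv_accepted_eq (n : String) :
    (pvMarkers.contains n || pvMarkers.any (fun marker => PySem.Str.startswith n (marker ++ "_"))
      || pvMarkers.any (fun marker => PySem.Str.startswith n (marker ++ "-")))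
    = PySem.Set.contains (PySem.Set.ofList pvMarkers) (String.ofList (pvLeadToken n.toList)) := by
  rw [Bool.eq_iff_iff]
  simp only [Bool.or_eq_true, List.contains_iff_mem, List.any_eq_true,
    PySem.Set.contains_iff, PySem.Set.mem_ofList, PySem.Str.startswith_eq,
    PySem.Chars.startswith_iff]
  constructor
  · rintro ((hmem | ⟨m, hmem, hpre⟩) | ⟨m, hmem, hpre⟩)
    · have ht : pvLeadToken n.toList = n.toList :=
        pvLeadToken_self n.toList (pvNoSep_markers n hmem)
      rw [ht, String.ofList_toList]; exact hmem
    · have hpre' : n.toList = m.toList ∨ (m.toList ++ ['_']) <+: n.toList ∨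
          (m.toList ++ ['-']) <+: n.toList := Or.inr (Or.inl (by simpa using hpre))
      have ht := (pvLeadToken_iff n.toList m.toList (pvNoSep_markers m hmem)).2 hpre'
      rw [ht, String.ofList_toList]; exact hmem
    · have hpre' : n.toList = m.toList ∨ (m.toList ++ ['_']) <+: n.toList ∨
          (m.toList ++ ['-']) <+: n.toList := Or.inr (Or.inr (by simpa using hpre))
      have ht := (pvLeadToken_iff n.toList m.toList (pvNoSep_markers m hmem)).2 hpre'
      rw [ht, String.ofList_toList]; exact hmem
  · intro hm
    have hns := pvNoSep_markers _ hm
    have htok : pvLeadToken n.toList = (String.ofList (pvLeadToken n.toList)).toList :=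
      (String.toList_ofList).symm
    rcases (pvLeadToken_iff n.toList _ hns).1 htok with heq | hpre | hpre
    · left; left
      have : n = String.ofList (pvLeadToken n.toList) := by
        have := congrArg String.ofList heq
        rwa [String.toList_ofList, String.ofList_toList] at this
      exact this ▸ hm
    · left; right
      exact ⟨String.ofList (pvLeadToken n.toList), hm, by simpa using hpre⟩
    · right
      exact ⟨String.ofList (pvLeadToken n.toList), hm, by simpa using hpre⟩

-- ===== VERDICT (by name: the statement is the Claim_ definition above) =====
theorem classify_step_lifecycle_py_spec : Claim_equal_classify_step_lifecycle_py := by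
  intro value _
  unfold Spec_classify_step_lifecycle_py classify_step_lifecycle_py classify_step_lifecycle_py_alt
  cases value with
  | none => rfl
  | some v =>
    simp only
    by_cases hn : PySem.Str.lower (PySem.Str.strip v) = ""
    · simp [hn]
    · rw [if_neg hn, if_neg hn, ← pv_accepted_eq]
      cases h1 : pvMarkers.contains (PySem.Str.lower (PySem.Str.strip v)) <;>
        cases h2 : pvMarkers.any (fun marker =>
            PySem.Str.startswith (PySem.Str.lower (PySem.Str.strip v)) (marker ++ "_")) <;>
          cases h3 : pvMarkers.any (fun marker =>
              PySem.Str.startswith (PySem.Str.lower (PySem.Str.strip v)) (marker ++ "-")) <;>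
            simp [h1, h2, h3]
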